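-- pv_equiv track=rewrite | github.com/blesson7777/TripMate | reports/views.py | _resolve_report_service_label
-- ===== SOURCE A (Python) =====
-- def _resolve_report_service_label(rows, query_service_name):
--     if query_service_name:
--         return query_service_name
--     non_empty = sorted(
--         {
--             (row.get("service_name") or "").strip()
--             for row in rows
--             if (row.get("service_name") or "").strip()
--         }
--     )
--     if len(non_empty) == 1:
--         return non_empty[0]
--     if len(non_empty) > 1:
--         return "Multiple Services"
--     return "Unspecified Service"
-- ===== SOURCE B (Python) =====
-- def _resolve_report_service_label(rows, query_service_name):
--     if query_service_name:
--         return query_service_name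
--     found = None
--     for row in rows:
--         name = (row.get("service_name") or "").strip()
--         if not name:
--             continue
--         if found is None:
--             found = name
--         elif name != found:
--             return "Multiple Services"
--     if found is None:
--         return "Unspecified Service"
--     return found
-- ===== Notes on version B (the rewrite author's own statement) =====
-- stated objective: simpler
-- what changed: Replaces the set-comprehension + sorted + length-case analysis with a single pass that tracks the first non-empty stripped name and returns 'Multiple Services' immediately on seeing a different one (no set, no sort, early exit).
import Mathlib
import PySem

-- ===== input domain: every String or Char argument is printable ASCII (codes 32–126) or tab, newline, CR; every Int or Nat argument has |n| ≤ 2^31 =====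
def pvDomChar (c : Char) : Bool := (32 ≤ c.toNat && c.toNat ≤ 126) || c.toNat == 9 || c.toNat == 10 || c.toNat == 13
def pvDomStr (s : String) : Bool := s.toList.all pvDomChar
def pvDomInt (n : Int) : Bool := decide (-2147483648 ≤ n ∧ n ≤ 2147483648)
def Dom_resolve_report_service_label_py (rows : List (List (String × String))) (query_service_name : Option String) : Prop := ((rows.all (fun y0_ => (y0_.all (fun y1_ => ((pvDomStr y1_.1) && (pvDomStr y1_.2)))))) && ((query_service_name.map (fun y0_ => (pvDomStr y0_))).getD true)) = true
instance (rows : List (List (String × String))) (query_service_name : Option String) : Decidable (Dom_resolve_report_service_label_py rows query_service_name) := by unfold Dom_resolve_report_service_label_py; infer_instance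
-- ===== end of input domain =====

-- B replaces A's set-comprehension + sorted + length-case analysis by a single early-exit pass
-- tracking the first non-empty stripped name (objective: simpler).


-- ===== PORT A =====
-- (row.get("service_name") or "").strip(); 'x or ""' collapses a missing key and "" alike to "", so getD "" is exact here
def pvRowName (row : List (String × String)) : String :=
  PySem.Str.strip (((PySem.Dict.mk row).get? "service_name").getD "")

def pvACore (rows : List (List (String × String))) : String :=
  let non_empty := PySem.List.sorted
    (PySem.Set.ofList ((rows.filter (fun row => pvRowName row ≠ "")).map pvRowName))
    (fun x => x) false
  if non_empty.length = 1 then non_empty.headD ""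
  else if non_empty.length > 1 then "Multiple Services"
  else "Unspecified Service"

def resolve_report_service_label_py (rows : List (List (String × String))) (query_service_name : Option String) : String :=
  match query_service_name with
  | some s => if s = "" then pvACore rows else s   -- 'if query_service_name:' — truthy ⇔ some non-empty string
  | none => pvACore rows

-- ===== PORT B =====
def pvBLoop : List (List (String × String)) → Option String → String
  | [], none => "Unspecified Service"
  | [], some f => f
  | row :: rs, found =>
      let name := PySem.Str.strip (((PySem.Dict.mk row).get? "service_name").getD "")
      if name = "" then pvBLoop rs found
      else match found with
        | none => pvBLoop rs (some name)
        | some f => if name = f then pvBLoop rs (some f) else "Multiple Services"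

def resolve_report_service_label_py_alt (rows : List (List (String × String))) (query_service_name : Option String) : String :=
  match query_service_name with
  | some s => if s = "" then pvBLoop rows none else s
  | none => pvBLoop rows none

-- ===== PRECONDITION & SPEC =====
def Spec_resolve_report_service_label_py (rows : List (List (String × String))) (query_service_name : Option String) (out : String) : Prop := out = resolve_report_service_label_py_alt rows query_service_name
instance (rows : List (List (String × String))) (query_service_name : Option String) (out : String) : Decidable (Spec_resolve_report_service_label_py rows query_service_name out) := by unfold Spec_resolve_report_service_label_py; infer_instance

-- ===== CLAIM (what is proved, stated in full; the proofs are below) =====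
def Claim_equal_resolve_report_service_label_py : Prop := ∀ (rows : List (List (String × String))) (query_service_name : Option String), Dom_resolve_report_service_label_py rows query_service_name → Spec_resolve_report_service_label_py rows query_service_name (resolve_report_service_label_py rows query_service_name)

-- ===== LEMMAS AND PROOFS =====

-- the list of non-empty stripped names, in row order
def pvNames (rows : List (List (String × String))) : List String :=
  (rows.filter (fun row => pvRowName row ≠ "")).map pvRowName

-- unfolding one step of B's loop in terms of pvRowName
lemma pvBLoop_cons (row : List (String × String)) (rs : List (List (String × String)))
    (found : Option String) :
    pvBLoop (row :: rs) found =
      (if pvRowName row = "" then pvBLoop rs found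
       else match found with
         | none => pvBLoop rs (some (pvRowName row))
         | some f => if pvRowName row = f then pvBLoop rs (some f) else "Multiple Services") := rfl

-- with a candidate in hand, B's loop returns it iff every later name agrees
lemma pvBLoop_some (rows : List (List (String × String))) (f : String) :
    pvBLoop rows (some f) =
      if (pvNames rows).all (· == f) then f else "Multiple Services" := by
  induction rows with
  | nil => simp [pvBLoop, pvNames]
  | cons row rs ih =>
    rw [pvBLoop_cons]
    by_cases h : pvRowName row = ""
    · simpa [pvNames, h] using ih
    · by_cases hf : pvRowName row = f
      · simp [pvNames, hf, ih]
      · simp [pvNames, h, hf]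

-- B's loop, from scratch, classified by the distinct names seen
lemma pvBLoop_none (rows : List (List (String × String))) :
    pvBLoop rows none =
      match PySem.Set.ofList (pvNames rows) with
      | [] => "Unspecified Service"
      | [x] => x
      | _ :: _ :: _ => "Multiple Services" := by
  induction rows with
  | nil => simp [pvBLoop, pvNames, PySem.Set.ofList_nil]
  | cons row rs ih =>
    rw [pvBLoop_cons]
    by_cases h : pvRowName row = ""
    · have hn : pvNames (row :: rs) = pvNames rs := by simp [pvNames, h]
      rw [hn]
      simpa [h] using ih
    · have hn : pvNames (row :: rs) = pvRowName row :: pvNames rs := by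
        simp [pvNames, h]
      rw [hn, PySem.Set.ofList_cons]
      rw [if_neg h]
      rw [pvBLoop_some]
      by_cases ha : (pvNames rs).all (· == pvRowName row)
      · have hd : PySem.Set.discard (PySem.Set.ofList (pvNames rs)) (pvRowName row) = [] := by
          rw [List.eq_nil_iff_forall_not_mem]
          intro y hy
          rw [PySem.Set.mem_discard] at hy
          have := hy.1
          rw [PySem.Set.mem_ofList] at this
          have := List.all_eq_true.mp ha y this
          exact hy.2 (by simpa using this)
        simp [ha, hd]
      · have hd : PySem.Set.discard (PySem.Set.ofList (pvNames rs)) (pvRowName row) ≠ [] := by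
          rw [List.all_eq_true] at ha
          push Not at ha
          obtain ⟨y, hy, hne⟩ := ha
          intro hnil
          have : y ∈ PySem.Set.discard (PySem.Set.ofList (pvNames rs)) (pvRowName row) := by
            rw [PySem.Set.mem_discard, PySem.Set.mem_ofList]
            exact ⟨hy, by simpa using hne⟩
          simp [hnil] at this
        simp only [if_neg ha]
        cases hdd : PySem.Set.discard (PySem.Set.ofList (pvNames rs)) (pvRowName row) with
        | nil => exact absurd hdd hd
        | cons a t => rfl

-- A's core, classified the same way (sorting a singleton is the identity)
lemma pvACore_eq (rows : List (List (String × String))) :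
    pvACore rows =
      match PySem.Set.ofList (pvNames rows) with
      | [] => "Unspecified Service"
      | [x] => x
      | _ :: _ :: _ => "Multiple Services" := by
  unfold pvACore
  have hns : (rows.filter (fun row => pvRowName row ≠ "")).map pvRowName = pvNames rows := rfl
  rw [hns]
  cases hS : PySem.Set.ofList (pvNames rows) with
  | nil => simp [PySem.List.sorted]
  | cons x t =>
    cases t with
    | nil => simp [PySem.List.sorted, PySem.List.insertBy]
    | cons y u =>
      have hl : (PySem.List.sorted (x :: y :: u) (fun x => x) false).length
          = (y :: u).length + 1 := by
        rw [PySem.List.length_sorted]; simp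
      simp only [hl]
      simp

-- ===== VERDICT (by name: the statement is the Claim_ definition above) =====
theorem resolve_report_service_label_py_spec : Claim_equal_resolve_report_service_label_py := by
  intro rows q _
  unfold Spec_resolve_report_service_label_py resolve_report_service_label_py resolve_report_service_label_py_alt
  have hcore : pvACore rows = pvBLoop rows none := by
    rw [pvACore_eq, pvBLoop_none]
  cases q with
  | none => exact hcore
  | some s =>
    by_cases hs : s = "" <;> simp [hs, hcore]
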